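-- pv_equiv track=rewrite | github.com/patterniha/SNI-Spoofing | main.py | _is_valid_hostname
-- ===== SOURCE A (Python) =====
-- def _is_valid_hostname(hostname: str) -> bool:
--     if not hostname or len(hostname) > 253:
--         return False
--     if hostname.endswith("."):
--         hostname = hostname[:-1]
--     labels = hostname.split(".")
--     if not labels:
--         return False
--     for label in labels:
--         if not label or len(label) > 63:
--             return False
--         if label.startswith("-") or label.endswith("-"):
--             return False
--         if not all(ch.isalnum() or ch == "-" for ch in label):
--             return False
--     return True
-- ===== SOURCE B (Python) =====
-- def _is_valid_hostname(hostname: str) -> bool: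
--     if not hostname or len(hostname) > 253:
--         return False
--     if hostname.endswith("."):
--         hostname = hostname[:-1]
--     n = 0          # length of the current label so far
--     prev = ""      # last character of the current label ("" at a label start)
--     for ch in hostname + ".":
--         if ch == ".":
--             if n == 0 or n > 63 or prev == "-":
--                 return False
--             n = 0
--             prev = ""
--         elif not (ch.isalnum() or ch == "-"):
--             return False
--         elif n == 0 and ch == "-":
--             return False
--         else:
--             n += 1
--             prev = ch
--     return True
-- ===== Notes on version B (the rewrite author's own statement) =====
-- stated objective: alternative
-- what changed: Replaces split-into-labels-then-validate-each with a single forward scan over the hostname that tracks the current label's length and last character and validates each label at its closing dot, never materialising the label list.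
import Mathlib
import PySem

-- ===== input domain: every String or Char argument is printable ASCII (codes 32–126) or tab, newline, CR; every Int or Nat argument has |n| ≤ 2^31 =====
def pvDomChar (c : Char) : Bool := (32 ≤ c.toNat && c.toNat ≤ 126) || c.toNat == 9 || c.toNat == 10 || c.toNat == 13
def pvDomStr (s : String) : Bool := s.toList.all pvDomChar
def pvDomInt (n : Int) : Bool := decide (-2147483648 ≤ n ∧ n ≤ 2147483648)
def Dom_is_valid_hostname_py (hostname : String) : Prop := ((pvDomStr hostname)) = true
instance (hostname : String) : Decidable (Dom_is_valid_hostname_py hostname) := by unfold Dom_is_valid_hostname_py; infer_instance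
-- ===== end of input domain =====

-- B replaces split-then-loop by a single forward scan that validates each label at its closing dot; same result, one pass, no intermediate label list (objective: alternative).

-- ===== PORT A =====
-- A: guards, strip one trailing dot, split on '.', then validate every label.
def is_valid_hostname_py (hostname : String) : Bool :=
  let cs := hostname.toList
  if cs.isEmpty || decide (cs.length > 253) then false
  else
    let cs := if PySem.Chars.endswith cs ['.'] then PySem.Chars.slice cs none (some (-1)) else cs
    let labels := PySem.Chars.splitOn cs ['.']
    if labels.isEmpty then false
    else labels.all (fun label =>
      !(label.isEmpty || decide (label.length > 63)) &&
      !(PySem.Chars.startswith label ['-'] || PySem.Chars.endswith label ['-']) &&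
      label.all (fun ch => PySem.Chars.isalnum ch || ch == '-'))

-- ===== PORT B =====
-- B's loop over `hostname + "."`: state = current-label length n and last char prev (none at a label start).
def pvScanB : List Char → Nat → Option Char → Bool
  | [], _, _ => true
  | c :: rest, n, prev =>
    if c = '.' then
      if n = 0 || decide (n > 63) || prev == some '-' then false
      else pvScanB rest 0 none
    else if !(PySem.Chars.isalnum c || c == '-') then false
    else if n = 0 && c == '-' then false
    else pvScanB rest (n + 1) (some c)

def is_valid_hostname_py_alt (hostname : String) : Bool :=
  let cs := hostname.toList
  if cs.isEmpty || decide (cs.length > 253) then false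
  else
    let cs := if PySem.Chars.endswith cs ['.'] then PySem.Chars.slice cs none (some (-1)) else cs
    pvScanB (cs ++ ['.']) 0 none

-- ===== PRECONDITION & SPEC =====
def Spec_is_valid_hostname_py (hostname : String) (out : Bool) : Prop := out = is_valid_hostname_py_alt hostname
instance (hostname : String) (out : Bool) : Decidable (Spec_is_valid_hostname_py hostname out) := by unfold Spec_is_valid_hostname_py; infer_instance

-- ===== CLAIM (what is proved, stated in full; the proofs are below) =====
def Claim_equal_is_valid_hostname_py : Prop := ∀ (hostname : String), Dom_is_valid_hostname_py hostname → Spec_is_valid_hostname_py hostname (is_valid_hostname_py hostname)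

-- ===== LEMMAS AND PROOFS =====

-- reference splitter: split a char list on '.' (cur = current label, reversed)
def pvSplit : List Char → List Char → List (List Char)
  | [], cur => [cur.reverse]
  | c :: rest, cur => if c = '.' then cur.reverse :: pvSplit rest [] else pvSplit rest (c :: cur)

def pvOk (c : Char) : Bool := PySem.Chars.isalnum c || c == '-'

def pvValid (label : List Char) : Bool :=
  !(label.isEmpty || decide (label.length > 63)) &&
  !(PySem.Chars.startswith label ['-'] || PySem.Chars.endswith label ['-']) &&
  label.all (fun ch => PySem.Chars.isalnum ch || ch == '-')

theorem pvGo_eq (fuel : Nat) : ∀ (l cur : List Char) (acc : List (List Char)), l.length < fuel →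
    PySem.Chars.splitOn.go ['.'] fuel l cur acc = acc.reverse ++ pvSplit l cur := by
  induction fuel with
  | zero => intro l cur acc h; omega
  | succ f ih =>
    intro l cur acc h
    cases l with
    | nil => simp [PySem.Chars.splitOn.go, pvSplit]
    | cons c rest =>
      by_cases hc : c = '.'
      · subst hc
        rw [PySem.Chars.splitOn.go.eq_def]
        simp only [List.isPrefixOf, BEq.rfl, Bool.true_and, if_true,
          List.length_cons, List.length_nil, List.drop_succ_cons, List.drop_zero]
        rw [ih rest [] _ (by simpa using Nat.lt_of_succ_lt_succ h)]
        simp [pvSplit]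
      · rw [PySem.Chars.splitOn.go.eq_def]
        have hpre : List.isPrefixOf ['.'] (c :: rest) = false := by
          simp [List.isPrefixOf]; exact fun h' => (hc h'.symm).elim
        simp only [hpre, if_false, Bool.false_eq_true]
        rw [ih rest (c :: cur) acc (by simpa using Nat.lt_of_succ_lt_succ h)]
        simp [pvSplit, hc]

theorem pvSplitOn_eq (cs : List Char) : PySem.Chars.splitOn cs ['.'] = pvSplit cs [] := by
  unfold PySem.Chars.splitOn
  rw [pvGo_eq (cs.length + 1) cs [] [] (by omega)]
  simp

theorem pvSplit_head (cs : List Char) : ∀ cur, (pvSplit cs cur).head? = some (cur.reverse ++ cs.takeWhile (· ≠ '.')) := by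
  induction cs with
  | nil => intro cur; simp [pvSplit]
  | cons c rest ih =>
    intro cur
    by_cases hc : c = '.'
    · subst hc; simp [pvSplit, List.takeWhile]
    · simp [pvSplit, hc, ih (c :: cur), List.takeWhile]

theorem pvSplit_ne_nil (cs cur : List Char) : pvSplit cs cur ≠ [] := by
  intro h
  have := pvSplit_head cs cur
  rw [h] at this
  simp at this

theorem pvStarts_head (p : List Char) (c : Char) : PySem.Chars.startswith p [c] = (p.head? == some c) := by
  cases p with
  | nil => simp [PySem.Chars.startswith, List.isPrefixOf]
  | cons a t => simp [PySem.Chars.startswith, List.isPrefixOf, BEq.comm]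

theorem pvEnds_last (p : List Char) (c : Char) : PySem.Chars.endswith p [c] = (p.getLast? == some c) := by
  unfold PySem.Chars.endswith
  have h1 : [c].isSuffixOf p = [c].isPrefixOf p.reverse := by simp [List.isSuffixOf]
  have h2 := pvStarts_head p.reverse c
  unfold PySem.Chars.startswith at h2
  rw [h1, h2, List.head?_reverse]

theorem pvValid_false_of_bad (L : List Char) (c : Char) (hc : c ∈ L) (h : pvOk c = false) :
    pvValid L = false := by
  unfold pvValid
  have hb : L.all (fun ch => PySem.Chars.isalnum ch || ch == '-') = false :=
    List.all_eq_false.mpr ⟨c, hc, by simpa [pvOk] using h⟩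
  simp [hb]

theorem pvValid_false_of_hyphen_start (L : List Char) (h : L.head? = some '-') : pvValid L = false := by
  unfold pvValid
  rw [pvStarts_head, h]
  simp

theorem pvAll_false_head (cs cur : List Char)
    (h : pvValid (cur.reverse ++ cs.takeWhile (· ≠ '.')) = false) :
    (pvSplit cs cur).all pvValid = false := by
  apply List.all_eq_false.mpr
  refine ⟨cur.reverse ++ cs.takeWhile (· ≠ '.'), ?_, by simpa using h⟩
  have hh := pvSplit_head cs cur
  exact List.mem_of_mem_head? (by rw [hh]; simp)

-- the boolean check B performs at a closing dot equals A's per-label validity, for a clean label p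
theorem pvDotStep (p : List Char) (X : Bool)
    (hok : ∀ c ∈ p, pvOk c = true) (hhd : p.head? ≠ some '-') :
    (if (decide (p.length = 0) || decide (p.length > 63) || (p.getLast? == some '-')) = true
      then false else X) = (pvValid p && X) := by
  have hall : p.all (fun ch => PySem.Chars.isalnum ch || ch == '-') = true := by
    simp only [List.all_eq_true]
    intro c hc
    simpa [pvOk] using hok c hc
  have hh : (p.head? == some '-') = false := by simpa using hhd
  have hE : p.isEmpty = decide (p.length = 0) := by cases p <;> simp
  unfold pvValid
  rw [pvStarts_head, pvEnds_last, hall, hh, hE]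
  by_cases h1 : p.length = 0 <;> by_cases h2 : p.length > 63 <;>
    cases (p.getLast? == some '-') <;> simp [h1, h2]

-- the scanner computes exactly "every label of pvSplit is pvValid", given a clean current label p
theorem pvScan_eq (cs : List Char) : ∀ (p : List Char),
    (∀ c ∈ p, pvOk c = true) → p.head? ≠ some '-' →
    pvScanB (cs ++ ['.']) p.length p.getLast? = (pvSplit cs p.reverse).all pvValid := by
  induction cs with
  | nil =>
    intro p hok hhd
    have hstep := pvDotStep p true hok hhd
    simp only [List.nil_append, pvScanB]
    rw [if_pos (by simp), hstep]
    simp [pvSplit]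
  | cons c rest ih =>
    intro p hok hhd
    by_cases hc : c = '.'
    · subst hc
      have hX := ih [] (by simp) (by simp)
      simp only [List.length_nil, List.getLast?_nil, List.reverse_nil] at hX
      have hstep := pvDotStep p (pvScanB (rest ++ ['.']) 0 none) hok hhd
      simp only [List.cons_append, pvScanB]
      rw [if_pos (by simp), hstep, hX]
      simp [pvSplit]
    · by_cases hokc : pvOk c = true
      · have hB : (PySem.Chars.isalnum c || c == '-') = true := by simpa [pvOk] using hokc
        by_cases hz : p.length = 0 ∧ c = '-'
        · -- hyphen at a label start: both sides reject
          obtain ⟨h0, hcv⟩ := hz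
          have hp : p = [] := List.length_eq_zero_iff.mp h0
          subst hp; subst hcv
          have hR : (pvSplit ('-' :: rest) ([] : List Char).reverse).all pvValid = false := by
            apply pvAll_false_head
            apply pvValid_false_of_hyphen_start
            simp [List.takeWhile, hc]
          rw [hR]
          simp only [List.cons_append, pvScanB, List.length_nil, List.getLast?_nil]
          rw [if_neg hc, if_neg (by simp), if_pos (by simp)]
        · -- ordinary character: extend the current label
          have hok' : ∀ x ∈ p ++ [c], pvOk x = true := by
            intro x hx
            rcases List.mem_append.mp hx with h | h
            · exact hok x h
            · simpa [List.mem_singleton.mp h] using hokc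
          have hhd' : (p ++ [c]).head? ≠ some '-' := by
            cases p with
            | nil =>
              simp only [List.nil_append, List.head?_cons]
              intro h
              exact hz ⟨rfl, by simpa using h⟩
            | cons a t => simpa using hhd
          have hIH := ih (p ++ [c]) hok' hhd'
          simp only [List.length_append, List.length_cons, List.length_nil,
            List.getLast?_concat, List.reverse_append, List.reverse_cons, List.reverse_nil,
            List.nil_append] at hIH
          have hsplit : pvSplit (c :: rest) p.reverse = pvSplit rest (c :: p.reverse) := by
            simp [pvSplit, hc]
          rw [hsplit]
          simp only [List.cons_append, pvScanB]
          rw [if_neg hc, if_neg (by simp [hB]),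
              if_neg (by
                intro h
                simp only [Bool.and_eq_true, decide_eq_true_eq, beq_iff_eq] at h
                exact hz h)]
          simpa using hIH
      · -- invalid character: both sides reject
        have hR : (pvSplit (c :: rest) p.reverse).all pvValid = false := by
          apply pvAll_false_head
          apply pvValid_false_of_bad _ c _ (by simpa using hokc)
          simp [List.takeWhile, hc]
        rw [hR]
        simp only [List.cons_append, pvScanB]
        rw [if_neg hc, if_pos (by simpa [pvOk] using hokc)]

-- ===== VERDICT (by name: the statement is the Claim_ definition above) =====
theorem is_valid_hostname_py_spec : Claim_equal_is_valid_hostname_py := by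
  intro hostname _
  unfold Spec_is_valid_hostname_py is_valid_hostname_py is_valid_hostname_py_alt
  by_cases hg : (hostname.toList.isEmpty || decide (hostname.toList.length > 253)) = true
  · rw [if_pos hg, if_pos hg]
  · rw [if_neg hg, if_neg hg]
    simp only [pvSplitOn_eq]
    generalize (if PySem.Chars.endswith hostname.toList ['.'] = true
      then PySem.Chars.slice hostname.toList none (some (-1)) else hostname.toList) = cs
    have hscan := pvScan_eq cs [] (by simp) (by simp)
    simp only [List.length_nil, List.getLast?_nil, List.reverse_nil] at hscan
    rw [hscan, if_neg (by simp [pvSplit_ne_nil cs []])]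
    rfl
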